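-- pv_equiv track=rewrite | github.com/kdurril/student_sextant | app/audit_review_class.py | sem_gen
-- ===== SOURCE A (Python) =====
-- def sem_gen(start_y=2015, start_sem='08', duration_y=5):
--     years = (x for x in range(start_y, start_y+duration_y))
--     sems = ('01','05','07','08','12')
--     max_credit = (15, 3, 3, 15, 3)
--     start = str(start_y)+start_sem
--     for y in years:
--         for x in sems:
--             if str(y)+x >= start:
--                 yield str(y)+x
-- ===== SOURCE B (Python) =====
-- def sem_gen(start_y=2015, start_sem='08', duration_y=5):
--     # Per year the five codes are ascending, so the kept ones form a suffix:
--     # binary-search the first code >= start, then emit the suffix slice.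
--     sems = ('01', '05', '07', '08', '12')
--     start = str(start_y) + start_sem
--     for y in range(start_y, start_y + duration_y):
--         p = str(y)
--         lo, hi = 0, len(sems)
--         while lo < hi:
--             mid = (lo + hi) // 2
--             if p + sems[mid] < start:
--                 lo = mid + 1
--             else:
--                 hi = mid
--         for x in sems[lo:]:
--             yield p + x
-- ===== Notes on version B (the rewrite author's own statement) =====
-- stated objective: alternative
-- what changed: Per year, B binary-searches the ascending 5-code block for the first code >= start and yields the suffix slice, instead of A's per-element >= filter over every code.
import Mathlib
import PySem

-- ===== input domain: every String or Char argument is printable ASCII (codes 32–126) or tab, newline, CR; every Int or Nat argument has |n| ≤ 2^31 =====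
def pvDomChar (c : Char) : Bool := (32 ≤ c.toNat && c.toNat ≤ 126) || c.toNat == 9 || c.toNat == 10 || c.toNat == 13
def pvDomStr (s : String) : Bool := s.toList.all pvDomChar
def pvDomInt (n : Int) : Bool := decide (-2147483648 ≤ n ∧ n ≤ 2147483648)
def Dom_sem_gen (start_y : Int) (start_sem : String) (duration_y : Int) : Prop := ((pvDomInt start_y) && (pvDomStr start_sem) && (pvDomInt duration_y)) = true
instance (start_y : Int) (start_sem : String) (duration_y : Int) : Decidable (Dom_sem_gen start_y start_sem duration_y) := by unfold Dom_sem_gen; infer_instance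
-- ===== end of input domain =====

-- B replaces A's per-element ">= start" filter by a per-year binary search for the first
-- code >= start followed by emitting the suffix slice (alternative decomposition, same cost).


-- ===== PORT A =====
-- the fixed tuple sems = ('01','05','07','08','12')
def pvSems : List String := ["01", "05", "07", "08", "12"]

-- Literal port of A: per year, per semester code, keep str(y)+x iff str(y)+x >= start.
-- Python str comparison = Lean '<' on the code-point lists (PYSEM.md); '>=' is '¬ <'.
def sem_gen (start_y : Int) (start_sem : String) (duration_y : Int) : List String :=
  let start : List Char := PySem.Int.toChars start_y ++ start_sem.toList
  (PySem.List.pyRange start_y (start_y + duration_y) 1).foldl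
    (fun acc y =>
      pvSems.foldl
        (fun acc x =>
          if ¬ ((PySem.Int.toChars y ++ x.toList) < start)
          then acc ++ [String.ofList (PySem.Int.toChars y ++ x.toList)]
          else acc)
        acc)
    []

-- ===== PORT B =====
-- the while-loop binary search of Source B: lo, hi move until lo = first index with p+sems[mid] >= start
-- (sems[mid] via getD: mid is always in range, so this matches Python's indexing)
def pvBisect (p start : List Char) (sems : List String) (lo hi : Nat) : Nat :=
  if h : lo < hi then
    let mid := (lo + hi) / 2
    if (p ++ (sems.getD mid "").toList) < start
    then pvBisect p start sems (mid + 1) hi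
    else pvBisect p start sems lo mid
  else lo
termination_by hi - lo
decreasing_by all_goals omega

-- Literal port of B: per year, binary-search the cut, then yield the suffix slice sems[lo:].
def sem_gen_alt (start_y : Int) (start_sem : String) (duration_y : Int) : List String :=
  let start : List Char := PySem.Int.toChars start_y ++ start_sem.toList
  (PySem.List.pyRange start_y (start_y + duration_y) 1).foldl
    (fun acc y =>
      let p := PySem.Int.toChars y
      let lo := pvBisect p start pvSems 0 pvSems.length
      acc ++ (PySem.List.slice pvSems (some (lo : Int)) none).map
               (fun x => String.ofList (p ++ x.toList)))
    []

-- ===== PRECONDITION & SPEC =====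
def Spec_sem_gen (start_y : Int) (start_sem : String) (duration_y : Int) (out : List String) : Prop := out = sem_gen_alt start_y start_sem duration_y
instance (start_y : Int) (start_sem : String) (duration_y : Int) (out : List String) : Decidable (Spec_sem_gen start_y start_sem duration_y out) := by unfold Spec_sem_gen; infer_instance

-- ===== CLAIM (what is proved, stated in full; the proofs are below) =====
def Claim_equal_sem_gen : Prop := ∀ (start_y : Int) (start_sem : String) (duration_y : Int), Dom_sem_gen start_y start_sem duration_y → Spec_sem_gen start_y start_sem duration_y (sem_gen start_y start_sem duration_y)

-- ===== LEMMAS AND PROOFS =====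

-- With a common prefix p, "p+x < start" is antitone along the ascending sems:
-- if a later (larger) code is < start, so is any earlier one.
theorem pv_mono (p t a b : List Char) (hab : a < b) (h : p ++ b < t) : p ++ a < t :=
  lt_trans (List.append_left_lt hab) h

-- Per-year equality: A's filtering fold over pvSems equals acc ++ the mapped suffix that
-- B's binary search selects.
theorem pv_year (p t : List Char) (acc : List String) :
    pvSems.foldl
      (fun acc x =>
        if ¬ ((p ++ x.toList) < t)
        then acc ++ [String.ofList (p ++ x.toList)]
        else acc)
      acc
    = acc ++ (List.drop (pvBisect p t pvSems 0 pvSems.length) pvSems).map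
               (fun x => String.ofList (p ++ x.toList)) := by
  by_cases h2 : (p ++ ['0','7'] < t)
  · have h1 : p ++ ['0','5'] < t := pv_mono p t _ _ (by decide) h2
    have h0 : p ++ ['0','1'] < t := pv_mono p t _ _ (by decide) h2
    by_cases h4 : (p ++ ['1','2'] < t)
    · have h3 : p ++ ['0','8'] < t := pv_mono p t _ _ (by decide) h4
      simp [pvSems, pvBisect, List.foldl, h2, h4, not_le.mpr h0, not_le.mpr h1,
        not_le.mpr h2, not_le.mpr h3, not_le.mpr h4]
    · by_cases h3 : (p ++ ['0','8'] < t)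
      · simp [pvSems, pvBisect, List.foldl, h2, h3, h4, not_le.mpr h0, not_le.mpr h1,
          not_le.mpr h2, not_le.mpr h3, not_lt.mp h4]
      · simp [pvSems, pvBisect, List.foldl, h2, h3, h4, not_le.mpr h0, not_le.mpr h1,
          not_le.mpr h2, not_lt.mp h3, not_lt.mp h4]
  · have h3 : ¬ (p ++ ['0','8'] < t) := fun h => h2 (pv_mono p t _ _ (by decide) h)
    have h4 : ¬ (p ++ ['1','2'] < t) := fun h => h2 (pv_mono p t _ _ (by decide) h)
    by_cases h1 : (p ++ ['0','5'] < t)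
    · have h0 : p ++ ['0','1'] < t := pv_mono p t _ _ (by decide) h1
      simp [pvSems, pvBisect, List.foldl, h1, h2, not_le.mpr h0, not_le.mpr h1,
        not_lt.mp h2, not_lt.mp h3, not_lt.mp h4]
    · by_cases h0 : (p ++ ['0','1'] < t)
      · simp [pvSems, pvBisect, List.foldl, h0, h1, h2, not_le.mpr h0,
          not_lt.mp h1, not_lt.mp h2, not_lt.mp h3, not_lt.mp h4]
      · simp [pvSems, pvBisect, List.foldl, h0, h1, h2, not_lt.mp h0,
          not_lt.mp h1, not_lt.mp h2, not_lt.mp h3, not_lt.mp h4]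

-- The two outer folds over the same year list agree, for any accumulator.
theorem pv_fold (t : List Char) (ys : List Int) (acc : List String) :
    ys.foldl
      (fun acc y =>
        pvSems.foldl
          (fun acc x =>
            if ¬ ((PySem.Int.toChars y ++ x.toList) < t)
            then acc ++ [String.ofList (PySem.Int.toChars y ++ x.toList)]
            else acc)
          acc)
      acc
    = ys.foldl
        (fun acc y =>
          acc ++ (PySem.List.slice pvSems
                    (some ((pvBisect (PySem.Int.toChars y) t pvSems 0 pvSems.length : Nat) : Int)) none).map
                   (fun x => String.ofList (PySem.Int.toChars y ++ x.toList)))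
        acc := by
  induction ys generalizing acc with
  | nil => rfl
  | cons y ys ih =>
    simp only [List.foldl_cons]
    rw [pv_year, ih, PySem.List.slice_from _ (by positivity), Int.toNat_natCast]

-- ===== VERDICT (by name: the statement is the Claim_ definition above) =====
theorem sem_gen_spec : Claim_equal_sem_gen := by
  intro start_y start_sem duration_y _
  unfold Spec_sem_gen sem_gen sem_gen_alt
  exact pv_fold _ _ _
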